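-- pv_equiv track=rewrite | github.com/keturk/datrix | scripts/dev/migrate_subscribe_out_of_pubsub.py | _brace_balance_to_zero
-- ===== SOURCE A (Python) =====
-- def _brace_balance_to_zero(lines: list[str], start: int) -> int:
--     """Return index after line that closes brace depth to zero (start at first line with ``{``)."""
--     depth = 0
--     started = False
--     j = start
--     while j < len(lines):
--         for ch in lines[j]:
--             if ch == "{":
--                 depth += 1
--                 started = True
--             elif ch == "}":
--                 depth -= 1
--         j += 1
--         if started and depth == 0:
--             return j
--     raise ValueError("Unbalanced braces while scanning pubsub block")
-- ===== SOURCE B (Python) =====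
-- def _brace_balance_to_zero(lines: list[str], start: int) -> int:
--     """Return index after line that closes brace depth to zero (start at first line with ``{``)."""
--     tail = lines[start:]
--     depths = []
--     total = 0
--     for line in tail:
--         total += line.count("{") - line.count("}")
--         depths.append(total)
--     first_open = next((i for i, line in enumerate(tail) if "{" in line), None)
--     if first_open is not None:
--         closers = depths[first_open:]
--         if 0 in closers:
--             return start + first_open + 1 + closers.index(0)
--     raise ValueError("Unbalanced braces while scanning pubsub block")
-- ===== Notes on version B (the rewrite author's own statement) =====
-- stated objective: alternative
-- what changed: A's single fused scan (running depth + started flag with an inner per-character loop and early return) is replaced by three staged passes: build the per-line prefix-depth table of lines[start:], find the first line containing '{', then return the position of the first zero in the table from that point via list.index.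
-- outside the precondition, e.g. on _brace_balance_to_zero(['{', '}'], -1): A returns 1, B raises ValueError
import Mathlib
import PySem

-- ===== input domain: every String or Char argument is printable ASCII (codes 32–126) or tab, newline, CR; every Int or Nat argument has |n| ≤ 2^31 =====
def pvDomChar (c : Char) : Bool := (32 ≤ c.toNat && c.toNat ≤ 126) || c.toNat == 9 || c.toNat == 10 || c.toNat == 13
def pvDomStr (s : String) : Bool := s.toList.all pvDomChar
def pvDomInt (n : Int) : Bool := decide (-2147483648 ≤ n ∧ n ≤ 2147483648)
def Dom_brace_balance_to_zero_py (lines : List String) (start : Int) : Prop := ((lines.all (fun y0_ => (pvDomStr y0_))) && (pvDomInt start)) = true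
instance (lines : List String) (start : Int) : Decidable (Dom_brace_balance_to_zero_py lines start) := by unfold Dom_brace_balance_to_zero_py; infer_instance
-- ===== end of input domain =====

-- B replaces A's fused scanning loop (running depth + started flag, early return) by three staged
-- passes: build the per-line prefix-depth table of lines[start:], locate the first line containing
-- '{', then look up the first zero in the table from that point (alternative decomposition).

-- ===== PORT A =====
-- A's inner 'for ch in lines[j]' loop body, as a fold step over (depth, started)
def braceLineStep (p : Int × Bool) (ch : Char) : Int × Bool :=
  if ch = '{' then (p.1 + 1, true) else if ch = '}' then (p.1 - 1, p.2) else p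

-- A's while loop; fuel = (len(lines) - j).toNat bounds the iterations, so fuel = 0 coincides with
-- the loop exit j ≥ len(lines); the fuel-0 and index-error branches return a junk 0 exactly where
-- the Python raises ValueError / IndexError (outside Pre_)
def braceLoopA (lines : List String) : Nat → Int → Int → Bool → Int
  | 0, _, _, _ => 0
  | fuel + 1, j, depth, started =>
    if j < (lines.length : Int) then
      match PySem.List.pyGet? lines j with
      | none => 0
      | some line =>
        let p := line.toList.foldl braceLineStep (depth, started)
        if p.2 ∧ p.1 = 0 then j + 1 else braceLoopA lines fuel (j + 1) p.1 p.2
    else 0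

def brace_balance_to_zero_py (lines : List String) (start : Int) : Int :=
  braceLoopA lines ((lines.length : Int) - start).toNat start 0 false

-- ===== PORT B =====
-- B's first pass: 'total += line.count("{") - line.count("}"); depths.append(total)'
def braceDepthsStep (p : List Int × Int) (line : String) : List Int × Int :=
  let t := p.2 + (PySem.Str.count line "{" : Int) - (PySem.Str.count line "}" : Int)
  (p.1 ++ [t], t)

def brace_balance_to_zero_py_alt (lines : List String) (start : Int) : Int :=
  let tail := PySem.List.slice lines (some start) none
  let depths := (tail.foldl braceDepthsStep (([] : List Int), (0 : Int))).1
  -- next((i for i, line in enumerate(tail) if "{" in line), None): first index whose line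
  -- contains '{' (findIdx? is exactly this first-match search), none if no line does
  match tail.findIdx? (fun line => PySem.Str.isIn "{" line) with
  | none => 0      -- ValueError path (outside Pre_)
  | some i0 =>
    let closers := PySem.List.slice depths (some (i0 : Int)) none
    if closers.contains 0 then
      match PySem.List.index? closers 0 with
      | some k => start + (i0 : Int) + 1 + (k : Int)
      | none => 0  -- unreachable: guarded by '0 in closers'
    else 0         -- ValueError path (outside Pre_)

-- ===== PRECONDITION & SPEC =====
def pvDelta (l : String) : Int := (l.toList.count '{' : Int) - (l.toList.count '}' : Int)
def pvNet (ls : List String) : Int := (ls.map pvDelta).sum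
def pvOpens (ls : List String) : Bool := ls.any (fun l => l.toList.contains '{')
def pvTail (lines : List String) (start : Int) : List String :=
  lines.drop (PySem.List.clampIdx lines.length start)

-- Pre_ excludes (a) inputs where A raises (start < -len(lines): IndexError; braces never balancing
-- to zero: ValueError), and (b) negative starts whose scan does not resolve within the final
-- -start lines, where A's Python negative indexing wraps around and rescans lines from the
-- beginning — an accident of negative indexing that B's slice-based scan does not reproduce
-- (B raises the ValueError there).
def Pre_brace_balance_to_zero_py (lines : List String) (start : Int) : Prop :=
  -(lines.length : Int) ≤ start ∧
  ∃ k : Nat, k < (pvTail lines start).length ∧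
    pvNet ((pvTail lines start).take (k + 1)) = 0 ∧
    pvOpens ((pvTail lines start).take (k + 1)) = true

instance (lines : List String) (start : Int) : Decidable (Pre_brace_balance_to_zero_py lines start) := by
  unfold Pre_brace_balance_to_zero_py; infer_instance

def pvWitness_brace_balance_to_zero_py : List String × Int := (["foo {", "}"], 0)

def Spec_brace_balance_to_zero_py (lines : List String) (start : Int) (out : Int) : Prop := out = brace_balance_to_zero_py_alt lines start
instance (lines : List String) (start : Int) (out : Int) : Decidable (Spec_brace_balance_to_zero_py lines start out) := by unfold Spec_brace_balance_to_zero_py; infer_instance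

-- ===== CLAIM (what is proved, stated in full; the proofs are below) =====
def Claim_equal_brace_balance_to_zero_py : Prop := ∀ (lines : List String) (start : Int), Dom_brace_balance_to_zero_py lines start → Pre_brace_balance_to_zero_py lines start → Spec_brace_balance_to_zero_py lines start (brace_balance_to_zero_py lines start)

-- ===== LEMMAS AND PROOFS =====

theorem count_go_single (c : Char) : ∀ (l : List Char) (fuel acc : Nat), l.length ≤ fuel →
    PySem.Chars.count.go [c] fuel l acc = acc + l.count c := by
  intro l
  induction l with
  | nil => intro fuel acc _; cases fuel <;> simp [PySem.Chars.count.go]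
  | cons h t ih =>
    intro fuel acc hf
    cases fuel with
    | zero => simp at hf
    | succ f =>
      have ht : t.length ≤ f := by simp at hf; omega
      by_cases hc : c = h
      · subst hc
        rw [show PySem.Chars.count.go [c] (f + 1) (c :: t) acc
              = PySem.Chars.count.go [c] f t (acc + 1) from by
            simp [PySem.Chars.count.go, List.isPrefixOf]]
        rw [ih f (acc + 1) ht, List.count_cons]
        simp
        omega
      · rw [show PySem.Chars.count.go [c] (f + 1) (h :: t) acc
              = PySem.Chars.count.go [c] f t acc from by
            simp [PySem.Chars.count.go, List.isPrefixOf, hc]]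
        rw [ih f acc ht, List.count_cons]
        simp [Ne.symm hc]

theorem str_count_single (l : String) (c : Char) :
    PySem.Str.count l (String.ofList [c]) = l.toList.count c := by
  rw [PySem.Str.count_eq]
  rw [show PySem.Chars.count l.toList (String.ofList [c]).toList
        = PySem.Chars.count.go [c] l.toList.length l.toList 0 from by
      simp [PySem.Chars.count]]
  rw [count_go_single c l.toList l.toList.length 0 le_rfl]
  omega

theorem str_isIn_single (l : String) (c : Char) :
    PySem.Str.isIn (String.ofList [c]) l = l.toList.contains c := by
  rw [show PySem.Str.isIn (String.ofList [c]) l = PySem.Chars.isIn [c] l.toList from by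
    simp [PySem.Str.isIn_eq]]
  by_cases h : c ∈ l.toList
  · have hinf : [c] <:+: l.toList := by
      obtain ⟨p, q, hpq⟩ := List.append_of_mem h
      exact ⟨p, q, by simp [hpq]⟩
    simp [(PySem.Chars.isIn_iff_infix _ _).2 hinf, h]
  · have hninf : ¬ ([c] <:+: l.toList) := fun hin => h (hin.subset (by simp))
    cases hb : PySem.Chars.isIn [c] l.toList
    · simp [h]
    · exact absurd ((PySem.Chars.isIn_iff_infix _ _).1 hb) hninf

theorem foldl_line (l : List Char) : ∀ (d : Int) (s : Bool),
    l.foldl braceLineStep (d, s) =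
      (d + (l.count '{' : Int) - (l.count '}' : Int), s || l.contains '{') := by
  induction l with
  | nil => intro d s; simp
  | cons c t ih =>
    intro d s
    by_cases h1 : c = '{'
    · subst h1
      simp [braceLineStep, ih]
      omega
    · by_cases h2 : c = '}'
      · subst h2
        simp [braceLineStep, h1, ih, Ne.symm h1]
        omega
      · simp [braceLineStep, h1, h2, ih, Ne.symm h1]

-- proof-only model of A's per-line loop over the tail (depth, started), returning the answer
def braceLoopB : List String → Int → Int → Int → Bool → Int
  | [], _, _, _, _ => 0
  | line :: rest, start, offset, depth, started =>
    let d := depth + pvDelta line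
    let s := started || line.toList.contains '{'
    if s ∧ d = 0 then start + offset else braceLoopB rest start (offset + 1) d s

-- the two loops march in lockstep over the same line sequence until the resolving line
theorem lockstep (lines : List String) : ∀ (rest : List String) (fuel : Nat) (j d : Int)
    (s : Bool) (start offset : Int),
    rest.length ≤ fuel →
    start + offset = j + 1 →
    (∀ i : Nat, i < rest.length → PySem.List.pyGet? lines (j + i) = rest[i]?) →
    (∃ k : Nat, k < rest.length ∧ d + pvNet (rest.take (k + 1)) = 0 ∧
      (s || pvOpens (rest.take (k + 1))) = true) →
    braceLoopA lines fuel j d s = braceLoopB rest start offset d s := by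
  intro rest
  induction rest with
  | nil =>
    intro fuel j d s start offset _ _ _ hres
    obtain ⟨k, hk, _⟩ := hres
    simp at hk
  | cons line rs ih =>
    intro fuel j d s start offset hfuel hoff hget hres
    obtain ⟨k, hk, hnet, hopen⟩ := hres
    obtain ⟨f, rfl⟩ : ∃ f, fuel = f + 1 := ⟨fuel - 1, by simp at hfuel; omega⟩
    have hline : PySem.List.pyGet? lines j = some line := by simpa using hget 0 (by simp)
    have hjlt : j < (lines.length : Int) := by
      by_contra hge
      have : PySem.List.pyGet? lines j = none :=
        (PySem.List.pyGet?_eq_none_iff lines j).2 (fun hr => hge hr.2)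
      simp [this] at hline
    set d' : Int := d + pvDelta line with hd'
    set s' : Bool := s || line.toList.contains '{' with hs'
    simp only [braceLoopA, braceLoopB, hline, foldl_line, if_pos hjlt]
    rw [show d + (line.toList.count '{' : Int) - (line.toList.count '}' : Int) = d' from by
      simp [hd', pvDelta]; ring]
    split_ifs with hstop
    · omega
    · apply ih f (j + 1) d' s' start (offset + 1)
      · simp at hfuel; omega
      · omega
      · intro i hi
        have := hget (i + 1) (by simp; omega)
        have harg : j + ((i : Int) + 1) = j + 1 + (i : Int) := by ring
        simpa [harg] using this
      · have hk0 : k ≠ 0 := by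
          intro h0
          subst h0
          apply hstop
          refine ⟨by simpa [hs', pvOpens] using hopen, ?_⟩
          have h1 : pvNet ((line :: rs).take 1) = pvDelta line := by simp [pvNet]
          rw [h1] at hnet
          omega
        obtain ⟨k', rfl⟩ : ∃ k', k = k' + 1 := ⟨k - 1, by omega⟩
        refine ⟨k', by simp at hk; omega, ?_, ?_⟩
        · have h1 : pvNet ((line :: rs).take (k' + 1 + 1))
              = pvDelta line + pvNet (rs.take (k' + 1)) := by simp [pvNet]
          rw [h1] at hnet
          rw [hd']
          omega
        · have h1 : pvOpens ((line :: rs).take (k' + 1 + 1))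
              = (line.toList.contains '{' || pvOpens (rs.take (k' + 1))) := by simp [pvOpens]
          rw [h1] at hopen
          rw [hs', Bool.or_assoc]
          simpa [Bool.or_assoc] using hopen

-- the index (within the tail) of the resolving line, as braceLoopB finds it
def firstK : List String → Int → Bool → Option Nat
  | [], _, _ => none
  | l :: rs, d, s =>
    let d' := d + pvDelta l
    let s' := s || l.toList.contains '{'
    if s' ∧ d' = 0 then some 0 else (firstK rs d' s').map (· + 1)

theorem loopB_firstK : ∀ (rest : List String) (start offset d : Int) (s : Bool),
    braceLoopB rest start offset d s = (firstK rest d s).elim 0 (fun k => start + offset + k) := by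
  intro rest
  induction rest with
  | nil => intro start offset d s; simp [braceLoopB, firstK]
  | cons l rs ih =>
    intro start offset d s
    simp only [braceLoopB, firstK]
    split_ifs with h
    · simp
    · rw [ih]
      cases firstK rs (d + pvDelta l) (s || l.toList.contains '{') with
      | none => simp
      | some k => simp; ring

theorem firstK_isSome : ∀ (ts : List String) (d : Int) (s : Bool),
    (∃ k : Nat, k < ts.length ∧ d + pvNet (ts.take (k + 1)) = 0 ∧
      (s || pvOpens (ts.take (k + 1))) = true) →
    (firstK ts d s).isSome := by
  intro ts
  induction ts with
  | nil => intro d s ⟨k, hk, _⟩; simp at hk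
  | cons l rs ih =>
    intro d s ⟨k, hk, hnet, hopen⟩
    simp only [firstK]
    split_ifs with h
    · simp
    · have hk0 : k ≠ 0 := by
        intro h0; subst h0
        apply h
        refine ⟨by simpa [pvOpens] using hopen, ?_⟩
        have h1 : pvNet ((l :: rs).take 1) = pvDelta l := by simp [pvNet]
        rw [h1] at hnet; omega
      obtain ⟨k', rfl⟩ : ∃ k', k = k' + 1 := ⟨k - 1, by omega⟩
      have := ih (d + pvDelta l) (s || l.toList.contains '{') ⟨k', by simp at hk; omega, by
        have h1 : pvNet ((l :: rs).take (k' + 1 + 1)) = pvDelta l + pvNet (rs.take (k' + 1)) := by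
          simp [pvNet]
        rw [h1] at hnet; omega, by
        have h1 : pvOpens ((l :: rs).take (k' + 1 + 1))
            = (l.toList.contains '{' || pvOpens (rs.take (k' + 1))) := by simp [pvOpens]
        rw [h1] at hopen
        rw [Bool.or_assoc]; simpa [Bool.or_assoc] using hopen⟩
      cases hf : firstK rs (d + pvDelta l) (s || l.toList.contains '{') with
      | none => rw [hf] at this; simp at this
      | some k'' => simp

-- the prefix-depth table B builds in its first pass
def pvPrefix : List String → Int → List Int
  | [], _ => []
  | l :: rs, d => (d + pvDelta l) :: pvPrefix rs (d + pvDelta l)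

theorem fold_depths : ∀ (ts : List String) (acc : List Int) (d : Int),
    (ts.foldl braceDepthsStep (acc, d)).1 = acc ++ pvPrefix ts d := by
  intro ts
  induction ts with
  | nil => intro acc d; simp [pvPrefix]
  | cons l rs ih =>
    intro acc d
    have hc : d + (PySem.Str.count l "{" : Int) - (PySem.Str.count l "}" : Int) = d + pvDelta l := by
      rw [show ("{" : String) = String.ofList ['{'] from rfl,
          show ("}" : String) = String.ofList ['}'] from rfl,
          str_count_single, str_count_single]
      simp [pvDelta]; ring
    simp only [List.foldl_cons, braceDepthsStep, pvPrefix, hc, ih]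
    simp

theorem firstK_true_index : ∀ (ts : List String) (d : Int) (k : Nat),
    firstK ts d true = some k → PySem.List.index? (pvPrefix ts d) 0 = some k := by
  intro ts
  induction ts with
  | nil => intro d k h; simp [firstK] at h
  | cons l rs ih =>
    intro d k h
    simp only [firstK, Bool.true_or, true_and] at h
    simp only [pvPrefix]
    split_ifs at h with hz
    · cases h
      rw [hz, PySem.List.index?_cons_self]
    · rw [PySem.List.index?_cons_of_ne _ (by omega : d + pvDelta l ≠ 0)]
      obtain ⟨k', hk', rfl⟩ := Option.map_eq_some_iff.1 h
      rw [ih _ _ hk']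
      rfl

theorem firstK_spec : ∀ (ts : List String) (d : Int) (k : Nat),
    firstK ts d false = some k →
    ∃ i0 : Nat, ts.findIdx? (fun l => l.toList.contains '{') = some i0 ∧ i0 ≤ k ∧
      PySem.List.index? ((pvPrefix ts d).drop i0) 0 = some (k - i0) := by
  intro ts
  induction ts with
  | nil => intro d k h; simp [firstK] at h
  | cons l rs ih =>
    intro d k h
    simp only [firstK, Bool.false_or] at h
    by_cases hop : l.toList.contains '{'
    · rw [hop] at h
      refine ⟨0, ?_, by omega, ?_⟩
      · rw [List.findIdx?_cons, if_pos hop]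
      · simp only [List.drop_zero, Nat.sub_zero]
        have h' : firstK (l :: rs) d true = some k := by
          simp only [firstK, Bool.true_or, true_and]
          simpa using h
        exact firstK_true_index (l :: rs) d k h'
    · rw [Bool.not_eq_true] at hop
      rw [hop] at h
      simp only [Bool.false_eq_true, false_and, if_false] at h
      obtain ⟨k', hk', rfl⟩ := Option.map_eq_some_iff.1 h
      obtain ⟨i0, hfi, hle, hidx⟩ := ih (d + pvDelta l) k' hk'
      refine ⟨i0 + 1, ?_, by omega, ?_⟩
      · rw [List.findIdx?_cons, if_neg (by simp only [hop]; exact Bool.false_ne_true), hfi]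
        rfl
      · simp only [pvPrefix, List.drop_succ_cons]
        simpa using hidx

-- assemble B's staged computation from firstK
theorem alt_eq_firstK (lines : List String) (start : Int) (k : Nat)
    (h : firstK (pvTail lines start) 0 false = some k) :
    brace_balance_to_zero_py_alt lines start = start + 1 + k := by
  unfold brace_balance_to_zero_py_alt
  rw [PySem.List.slice_some_none]
  obtain ⟨i0, hfi, hle, hidx⟩ := firstK_spec (pvTail lines start) 0 k h
  have hfi' : (pvTail lines start).findIdx? (fun line => PySem.Str.isIn "{" line) = some i0 := by
    rw [show (fun line => PySem.Str.isIn "{" line)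
          = (fun l : String => l.toList.contains '{') from by
      funext l
      rw [show ("{" : String) = String.ofList ['{'] from rfl, str_isIn_single]]
    exact hfi
  have hdep : ((pvTail lines start).foldl braceDepthsStep (([] : List Int), (0 : Int))).1
      = pvPrefix (pvTail lines start) 0 := by
    rw [fold_depths]; simp
  simp only [pvTail] at hfi' hdep hidx ⊢
  rw [hfi', hdep]
  simp only [PySem.List.slice_from_natCast]
  have hmem : (0 : Int) ∈ (pvPrefix (lines.drop (PySem.List.clampIdx lines.length start)) 0).drop i0 :=
    (PySem.List.index?_isSome_iff _ _).1 (by rw [hidx]; rfl)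
  rw [hidx]
  have hcont : ((pvPrefix (lines.drop (PySem.List.clampIdx lines.length start)) 0).drop i0).contains (0 : Int) = true := by
    simpa using hmem
  rw [hcont]
  simp
  omega

-- ===== VERDICT (by name: the statement is the Claim_ definition above) =====
theorem brace_balance_to_zero_py_spec : Claim_equal_brace_balance_to_zero_py := by
  intro lines start _ hpre
  obtain ⟨hlow, k, hk, hnet, hopen⟩ := hpre
  unfold Spec_brace_balance_to_zero_py
  have hA : brace_balance_to_zero_py lines start
      = braceLoopB (pvTail lines start) start 1 0 false := by
    unfold brace_balance_to_zero_py
    have hlen : (pvTail lines start).length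
        = lines.length - PySem.List.clampIdx lines.length start := by
      simp [pvTail]
    apply lockstep lines (pvTail lines start)
    · rw [hlen]
      simp only [PySem.List.clampIdx]
      split_ifs <;> omega
    · omega
    · intro i hi
      rw [hlen] at hi
      have hdrop : (pvTail lines start)[i]? = lines[PySem.List.clampIdx lines.length start + i]? := by
        simp [pvTail]
      rw [hdrop]
      by_cases hneg : start < 0
      · have hm : PySem.List.clampIdx lines.length start = ((lines.length : Int) + start).toNat := by
          simp only [PySem.List.clampIdx]
          split_ifs <;> omega
        rw [hm] at hi ⊢
        have hio : start + (i : Int) < 0 := by omega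
        set kk : Nat := (-(start + (i : Int))).toNat with hkk
        have h1 : start + (i : Int) = -(kk : Int) := by omega
        have h2 : 0 < kk := by omega
        have h3 : kk ≤ lines.length := by omega
        rw [h1, PySem.List.pyGet?_neg_natCast lines kk h2 h3]
        have h4 : lines.length - kk = ((lines.length : Int) + start).toNat + i := by omega
        rw [h4]
      · have hmin : PySem.List.clampIdx lines.length start = min start.toNat lines.length := by
          simp only [PySem.List.clampIdx, if_neg hneg]
        rw [hmin] at hi ⊢
        rw [PySem.List.pyGet?_of_nonneg lines (by omega : (0:Int) ≤ start + (i : Int))]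
        have h4 : (start + (i : Int)).toNat = min start.toNat lines.length + i := by omega
        rw [h4]
    · exact ⟨k, hk, by simpa using hnet, by simpa using hopen⟩
  have hsome : (firstK (pvTail lines start) 0 false).isSome :=
    firstK_isSome _ _ _ ⟨k, hk, by simpa using hnet, by simpa using hopen⟩
  obtain ⟨k0, hk0⟩ := Option.isSome_iff_exists.1 hsome
  rw [hA, loopB_firstK, hk0, alt_eq_firstK lines start k0 hk0]
  simp
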